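-- pv_equiv track=rewrite | github.com/JaredBears/Formation-Python | SumVowelsAndConsonants.py | solution
-- ===== SOURCE A (Python) =====
-- def solution(s):
--     vowels = set(["a","e","i","o","u"])
--     answer = 0
--     for ch in s:
--         if ch in vowels:
--             answer += 1
--         else:
--             answer += 2
--     return answer
-- ===== SOURCE B (Python) =====
-- def solution(s):
--     # Tally each distinct character once, then weight the tallies:
--     # a vowel contributes 1 per occurrence, any other character 2.
--     counts = {}
--     for ch in s:
--         counts[ch] = counts.get(ch, 0) + 1
--     vowels = set(["a", "e", "i", "o", "u"])
--     total = 0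
--     for ch, n in counts.items():
--         total += n * (1 if ch in vowels else 2)
--     return total
-- ===== Notes on version B (the rewrite author's own statement) =====
-- stated objective: alternative
-- what changed: B first builds a dict tallying occurrences of each distinct character, then sums count*weight over the distinct characters, instead of A's single per-character if/else accumulation over the string.
import Mathlib
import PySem

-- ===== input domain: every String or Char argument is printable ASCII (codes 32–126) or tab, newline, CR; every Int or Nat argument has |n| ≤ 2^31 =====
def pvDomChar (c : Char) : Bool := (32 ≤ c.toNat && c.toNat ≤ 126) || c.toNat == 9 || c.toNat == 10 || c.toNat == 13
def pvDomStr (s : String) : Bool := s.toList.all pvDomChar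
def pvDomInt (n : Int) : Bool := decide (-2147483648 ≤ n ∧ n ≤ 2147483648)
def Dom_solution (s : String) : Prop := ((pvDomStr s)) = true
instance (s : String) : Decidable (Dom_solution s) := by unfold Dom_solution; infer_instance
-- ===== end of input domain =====

-- B tallies each distinct character once into a dict and sums count×weight over the distinct
-- characters, instead of A's per-character if/else accumulation (alternative decomposition).


-- ===== PORT A =====
def pvVowels : PySem.Set Char := PySem.Set.ofList ['a', 'e', 'i', 'o', 'u']

def solution (s : String) : Int :=
  s.toList.foldl (fun answer ch =>
    if ch ∈ pvVowels then answer + 1 else answer + 2) 0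

-- ===== PORT B =====
def solution_alt (s : String) : Int :=
  let counts : PySem.Dict Char Int :=
    s.toList.foldl (fun d ch => d.insert ch (d.getD ch 0 + 1)) PySem.Dict.empty
  counts.items.foldl (fun total p =>
    total + p.2 * (if p.1 ∈ pvVowels then 1 else 2)) 0

-- ===== PRECONDITION & SPEC =====
def Spec_solution (s : String) (out : Int) : Prop := out = solution_alt s
instance (s : String) (out : Int) : Decidable (Spec_solution s out) := by unfold Spec_solution; infer_instance

-- ===== CLAIM (what is proved, stated in full; the proofs are below) =====
def Claim_equal_solution : Prop := ∀ (s : String), Dom_solution s → Spec_solution s (solution s)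

-- ===== LEMMAS AND PROOFS =====

-- per-character weight both programs use
def pvW (ch : Char) : Int := if ch ∈ pvVowels then 1 else 2

-- A's loop is the sum of the weights over the string
lemma solutionA_eq_sum (l : List Char) :
    l.foldl (fun answer ch => if ch ∈ pvVowels then answer + 1 else answer + 2) 0
      = (l.map pvW).sum := by
  have h : ∀ (init : Int),
      l.foldl (fun answer ch => if ch ∈ pvVowels then answer + 1 else answer + 2) init
        = init + (l.map pvW).sum := by
    induction l with
    | nil => simp
    | cons c t ih =>
      intro init
      simp only [List.foldl_cons, List.map_cons, List.sum_cons, ih, pvW]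
      split_ifs <;> ring
  simpa using h 0

-- summing count k * f k over the distinct elements recovers the sum of f over the list
lemma sum_ofList_count_mul (l : List Char) (f : Char → Int) :
    ((PySem.Set.ofList l).map (fun k => (l.count k : Int) * f k)).sum = (l.map f).sum := by
  have hperm : (PySem.Set.ofList l).Perm l.dedup := by
    apply List.perm_of_nodup_nodup_toFinset_eq (PySem.Set.nodup_ofList l) l.nodup_dedup
    ext x; simp [PySem.Set.mem_ofList]
  rw [(hperm.map _).sum_eq, Finset.sum_list_map_count l f,
    show (∑ a ∈ l.toFinset, l.count a • f a) = (l.dedup.map (fun a => l.count a • f a)).sum from rfl]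
  simp

-- B's loops: the counter's items folded with count × weight equal the sum of the weights
lemma solutionB_eq_sum (l : List Char) :
    ((l.foldl (fun d ch => d.insert ch (d.getD ch 0 + 1)) PySem.Dict.empty :
        PySem.Dict Char Int).items).foldl
      (fun total p => total + p.2 * (if p.1 ∈ pvVowels then 1 else 2)) 0
      = (l.map pvW).sum := by
  rw [PySem.Dict.foldl_insert_getD_add_one_eq_counter, PySem.Dict.items_counter,
    PySem.List.foldl_add]
  simp only [List.map_map, Function.comp_def, zero_add]
  exact sum_ofList_count_mul l pvW

-- ===== VERDICT (by name: the statement is the Claim_ definition above) =====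
theorem solution_spec : Claim_equal_solution := by
  intro s _
  unfold Spec_solution solution solution_alt
  rw [solutionA_eq_sum, solutionB_eq_sum]
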